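-- pv_equiv track=rewrite | github.com/pypi-data/pypi-mirror-52 | packages/lupin-utils/lupin_utils-0.2.2.tar.gz/lupin_utils-0.2.2/lupin_utils/transformers/join.py | split_dimension
-- ===== SOURCE A (Python) =====
-- from typing import List, Tuple, Dict
--
-- def split_dimension(config_features: List, config_types: List) -> Tuple:
--     """
--     拆分单维特征和多维特征的字段以及连续字段
--     :return:
--     """
--
--     multiple_fields = []
--     single_fields = []
--     continuous_fields = []
--
--     if len(config_features) != len(config_types):
--         raise Exception('length not matches')
--     for i in range(0, len(config_features)):
--         cn = config_features[i]
--         cnt = config_types[i]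
--         if cnt.lower() == 'list':
--             multiple_fields.append(cn)
--         elif cnt.lower() == 'continuous':
--             continuous_fields.append(cn)
--         else:
--             single_fields.append(cn)
--
--     return multiple_fields, single_fields, continuous_fields
-- ===== SOURCE B (Python) =====
-- def split_dimension(config_features, config_types):
--     """Same result via three independent filtered scans over the zipped pairs
--     instead of one classifying loop."""
--     if len(config_features) != len(config_types):
--         raise Exception('length not matches')
--     pairs = list(zip(config_features, config_types))
--     multiple_fields = [cn for cn, cnt in pairs if cnt.lower() == 'list']
--     continuous_fields = [cn for cn, cnt in pairs if cnt.lower() == 'continuous']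
--     single_fields = [cn for cn, cnt in pairs
--                      if cnt.lower() not in ('list', 'continuous')]
--     return multiple_fields, single_fields, continuous_fields
-- ===== Notes on version B (the rewrite author's own statement) =====
-- stated objective: alternative
-- what changed: Replaces A's single index-driven classifying loop with three independent filtered comprehensions over the zipped (field, type) pairs, one per bucket.
import Mathlib
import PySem

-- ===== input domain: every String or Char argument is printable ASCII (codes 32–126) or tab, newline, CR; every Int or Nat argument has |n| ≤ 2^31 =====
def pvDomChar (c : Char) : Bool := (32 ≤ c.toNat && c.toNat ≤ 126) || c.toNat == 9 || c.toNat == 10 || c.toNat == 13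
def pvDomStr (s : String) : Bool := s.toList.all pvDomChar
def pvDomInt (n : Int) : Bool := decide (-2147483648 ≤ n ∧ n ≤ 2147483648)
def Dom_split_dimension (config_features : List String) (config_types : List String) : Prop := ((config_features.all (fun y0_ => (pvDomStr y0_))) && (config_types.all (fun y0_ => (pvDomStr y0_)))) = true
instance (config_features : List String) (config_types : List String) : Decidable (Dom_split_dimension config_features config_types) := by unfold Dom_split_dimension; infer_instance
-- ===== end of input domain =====

-- B replaces A's single classifying index loop with three independent filtered scans
-- over the zipped pairs (objective: alternative decomposition, same cost).

-- ===== PORT A =====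
-- for i in range(0, len(config_features)): classify config_features[i] by config_types[i].lower()
def split_dimension (config_features : List String) (config_types : List String) : List String × List String × List String :=
  let r :=
    (PySem.List.pyRange 0 (PySem.List.len config_features) 1).foldl
      (fun (acc : List String × List String × List String) i =>
        let cn := PySem.List.pyGetD config_features i ""
        let cnt := PySem.List.pyGetD config_types i ""
        if PySem.Str.lower cnt == "list" then
          (acc.1 ++ [cn], acc.2.1, acc.2.2)
        else if PySem.Str.lower cnt == "continuous" then
          (acc.1, acc.2.1, acc.2.2 ++ [cn])
        else
          (acc.1, acc.2.1 ++ [cn], acc.2.2))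
      ([], [], [])
  (r.1, r.2.1, r.2.2)

-- ===== PORT B =====
-- pairs = zip(features, types); one filtered comprehension per bucket
def split_dimension_alt (config_features : List String) (config_types : List String) : List String × List String × List String :=
  let pairs := config_features.zip config_types
  let multiple_fields := (pairs.filter (fun p => PySem.Str.lower p.2 == "list")).map (·.1)
  let continuous_fields := (pairs.filter (fun p => PySem.Str.lower p.2 == "continuous")).map (·.1)
  let single_fields := (pairs.filter (fun p => !(PySem.Str.lower p.2 == "list" || PySem.Str.lower p.2 == "continuous"))).map (·.1)
  (multiple_fields, single_fields, continuous_fields)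

-- ===== PRECONDITION & SPEC =====
-- Pre_ excludes length mismatches, on which A raises Exception('length not matches').
def Pre_split_dimension (config_features : List String) (config_types : List String) : Prop :=
  config_features.length = config_types.length
instance (config_features : List String) (config_types : List String) : Decidable (Pre_split_dimension config_features config_types) := by unfold Pre_split_dimension; infer_instance

def pvWitness_split_dimension : List String × List String :=
  (["a", "b", "c", "d"], ["List", "int", "Continuous", "list"])

def Spec_split_dimension (config_features : List String) (config_types : List String) (out : List String × List String × List String) : Prop := out = split_dimension_alt config_features config_types
instance (config_features : List String) (config_types : List String) (out : List String × List String × List String) : Decidable (Spec_split_dimension config_features config_types out) := by unfold Spec_split_dimension; infer_instance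

-- ===== CLAIM (what is proved, stated in full; the proofs are below) =====
def Claim_equal_split_dimension : Prop := ∀ (config_features : List String) (config_types : List String), Dom_split_dimension config_features config_types → Pre_split_dimension config_features config_types → Spec_split_dimension config_features config_types (split_dimension config_features config_types)

-- ===== LEMMAS AND PROOFS =====

-- The index loop reads exactly the zipped pairs.
theorem pyRange_map_pair_eq_zip (cf ct : List String) (h : cf.length = ct.length) :
    (PySem.List.pyRange 0 (PySem.List.len cf) 1).map
      (fun i => (PySem.List.pyGetD cf i "", PySem.List.pyGetD ct i "")) = cf.zip ct := by
  rw [PySem.List.pyRange_one]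
  simp only [PySem.List.len_eq, Int.sub_zero, Int.toNat_natCast, List.map_map]
  apply List.ext_getElem
  · simp [h]
  · intro k hk1 hk2
    simp only [List.getElem_map, List.getElem_range, Function.comp_apply, List.getElem_zip]
    simp only [List.length_map, List.length_range] at hk1
    rw [PySem.List.pyGetD_of_nonneg, PySem.List.pyGetD_of_nonneg] <;>
      simp [hk1, h ▸ hk1]

-- The classifying fold over any pair list equals the three filters (accumulator-generalised).
theorem fold_eq_filters (ps : List (String × String))
    (m s c : List String) :
    ps.foldl
      (fun (acc : List String × List String × List String) p =>
        if PySem.Str.lower p.2 == "list" then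
          (acc.1 ++ [p.1], acc.2.1, acc.2.2)
        else if PySem.Str.lower p.2 == "continuous" then
          (acc.1, acc.2.1, acc.2.2 ++ [p.1])
        else
          (acc.1, acc.2.1 ++ [p.1], acc.2.2))
      (m, s, c) =
    (m ++ (ps.filter (fun p => PySem.Str.lower p.2 == "list")).map (·.1),
     s ++ (ps.filter (fun p => !(PySem.Str.lower p.2 == "list" || PySem.Str.lower p.2 == "continuous"))).map (·.1),
     c ++ (ps.filter (fun p => PySem.Str.lower p.2 == "continuous")).map (·.1)) := by
  induction ps generalizing m s c with
  | nil => simp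
  | cons p t ih =>
    rw [List.foldl_cons]
    by_cases h1 : PySem.Str.lower p.2 == "list"
    · have hstep : (if PySem.Str.lower p.2 == "list" then ((m, s, c).1 ++ [p.1], (m, s, c).2.1, (m, s, c).2.2)
          else if PySem.Str.lower p.2 == "continuous" then ((m, s, c).1, (m, s, c).2.1, (m, s, c).2.2 ++ [p.1])
          else ((m, s, c).1, (m, s, c).2.1 ++ [p.1], (m, s, c).2.2)) = (m ++ [p.1], s, c) := by
        simp [h1]
      rw [hstep, ih]
      have h1' : PySem.Str.lower p.2 = "list" := by simpa using h1
      simp [h1']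
    · by_cases h2 : PySem.Str.lower p.2 == "continuous"
      · have hstep : (if PySem.Str.lower p.2 == "list" then ((m, s, c).1 ++ [p.1], (m, s, c).2.1, (m, s, c).2.2)
          else if PySem.Str.lower p.2 == "continuous" then ((m, s, c).1, (m, s, c).2.1, (m, s, c).2.2 ++ [p.1])
          else ((m, s, c).1, (m, s, c).2.1 ++ [p.1], (m, s, c).2.2)) = (m, s, c ++ [p.1]) := by
          simp [h1, h2]
        rw [hstep, ih]
        simp [h1, h2]
      · have hstep : (if PySem.Str.lower p.2 == "list" then ((m, s, c).1 ++ [p.1], (m, s, c).2.1, (m, s, c).2.2)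
          else if PySem.Str.lower p.2 == "continuous" then ((m, s, c).1, (m, s, c).2.1, (m, s, c).2.2 ++ [p.1])
          else ((m, s, c).1, (m, s, c).2.1 ++ [p.1], (m, s, c).2.2)) = (m, s ++ [p.1], c) := by
          simp [h1, h2]
        rw [hstep, ih]
        simp [h1, h2]

-- ===== VERDICT (by name: the statement is the Claim_ definition above) =====
theorem split_dimension_spec : Claim_equal_split_dimension := by
  intro cf ct _ hpre
  unfold Spec_split_dimension
  simp only [split_dimension, split_dimension_alt]
  have hmap := pyRange_map_pair_eq_zip cf ct hpre
  rw [show (PySem.List.pyRange 0 (PySem.List.len cf) 1).foldl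
        (fun (acc : List String × List String × List String) i =>
          if PySem.Str.lower (PySem.List.pyGetD ct i "") == "list" then
            (acc.1 ++ [PySem.List.pyGetD cf i ""], acc.2.1, acc.2.2)
          else if PySem.Str.lower (PySem.List.pyGetD ct i "") == "continuous" then
            (acc.1, acc.2.1, acc.2.2 ++ [PySem.List.pyGetD cf i ""])
          else (acc.1, acc.2.1 ++ [PySem.List.pyGetD cf i ""], acc.2.2)) ([], [], []) =
      ((cf.zip ct).foldl
        (fun (acc : List String × List String × List String) p =>
          if PySem.Str.lower p.2 == "list" then (acc.1 ++ [p.1], acc.2.1, acc.2.2)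
          else if PySem.Str.lower p.2 == "continuous" then (acc.1, acc.2.1, acc.2.2 ++ [p.1])
          else (acc.1, acc.2.1 ++ [p.1], acc.2.2)) ([], [], []))
      from by rw [← hmap, List.foldl_map]]
  rw [fold_eq_filters]
  simp
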